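-- pv_equiv track=rewrite | github.com/robinklaassen/advent-of-code-2019 | day17/part1.py | map_output_to_grid
-- ===== SOURCE A (Python) =====
-- from typing import List, Tuple
--
-- def map_output_to_grid(output: List[int]) -> List[List[int]]:
--     grid = []
--     row = []
--     for i in output[0:-1]:  # output ends on 2x 10
--         if i == 10:
--             grid.append(row)
--             row = []
--         else:
--             row.append(i)
--     return grid
-- ===== SOURCE B (Python) =====
-- from typing import List
--
--
-- def map_output_to_grid(output: List[int]) -> List[List[int]]:
--     # A row is a newline-terminated segment; data after the last newline
--     # (including the final sentinel element) is not a complete row.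
--     data = output[:-1]
--     breaks = [i for i, v in enumerate(data) if v == 10]
--     grid = []
--     prev = 0
--     for i in breaks:
--         grid.append(data[prev:i])
--         prev = i + 1
--     return grid
-- ===== Notes on version B (the rewrite author's own statement) =====
-- stated objective: alternative
-- what changed: Replaces A's single-pass accumulate-and-flush row building (append element or flush row on each 10) by a two-pass structure: first build the table of newline positions with enumerate, then cut the trimmed list into slices between consecutive positions.
import Mathlib
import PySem

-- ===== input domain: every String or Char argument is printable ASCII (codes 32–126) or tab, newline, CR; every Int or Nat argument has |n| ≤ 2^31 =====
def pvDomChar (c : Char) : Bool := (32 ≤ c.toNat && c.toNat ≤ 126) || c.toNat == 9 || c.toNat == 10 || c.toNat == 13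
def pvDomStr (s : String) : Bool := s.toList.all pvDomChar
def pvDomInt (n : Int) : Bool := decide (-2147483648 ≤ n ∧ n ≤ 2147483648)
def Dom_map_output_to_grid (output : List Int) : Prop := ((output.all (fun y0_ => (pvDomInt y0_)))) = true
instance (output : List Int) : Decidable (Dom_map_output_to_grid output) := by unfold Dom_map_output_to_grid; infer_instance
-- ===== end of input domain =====

-- B replaces A's accumulate-and-flush row loop by a two-pass structure: a table of
-- newline positions, then slices between consecutive positions (alternative decomposition, same cost).


-- ===== PORT A =====
def pvStepA (s : List (List Int) × List Int) (i : Int) : List (List Int) × List Int :=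
  if i = 10 then (s.1 ++ [s.2], ([] : List Int)) else (s.1, s.2 ++ [i])

def map_output_to_grid (output : List Int) : List (List Int) :=
  ((PySem.List.slice output (some 0) (some (-1))).foldl pvStepA ([], [])).1

-- ===== PORT B =====
def pvStepB (data : List Int) (s : List (List Int) × Int) (i : Int) : List (List Int) × Int :=
  (s.1 ++ [PySem.List.slice data (some s.2) (some i)], i + 1)

def map_output_to_grid_alt (output : List Int) : List (List Int) :=
  let data := PySem.List.slice output (some 0) (some (-1))
  let breaks := ((PySem.List.enumerate data 0).filter (fun p => p.2 == 10)).map Prod.fst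
  (breaks.foldl (pvStepB data) (([] : List (List Int)), (0 : Int))).1

-- ===== PRECONDITION & SPEC =====
def Spec_map_output_to_grid (output : List Int) (out : List (List Int)) : Prop := out = map_output_to_grid_alt output
instance (output : List Int) (out : List (List Int)) : Decidable (Spec_map_output_to_grid output out) := by unfold Spec_map_output_to_grid; infer_instance

-- ===== CLAIM (what is proved, stated in full; the proofs are below) =====
def Claim_equal_map_output_to_grid : Prop := ∀ (output : List Int), Dom_map_output_to_grid output → Spec_map_output_to_grid output (map_output_to_grid output)

-- ===== LEMMAS AND PROOFS =====

/-- The rows A's loop flushes, as a recursion (`r` = pending row). -/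
def pvRowsOf (r : List Int) : List Int → List (List Int)
  | [] => []
  | x :: xs => if x = 10 then r :: pvRowsOf [] xs else pvRowsOf (r ++ [x]) xs

lemma foldA_eq_rowsOf (xs : List Int) (g : List (List Int)) (r : List Int) :
    (xs.foldl pvStepA (g, r)).1 = g ++ pvRowsOf r xs := by
  induction xs generalizing g r with
  | nil => simp [pvRowsOf]
  | cons x t ih =>
    by_cases hx : x = 10 <;>
      simp [pvStepA, pvRowsOf, hx, ih]

/-- Newline positions of a list, relative to its own start. -/
def pvBreaks : List Int → List Nat
  | [] => []
  | x :: t => if x = 10 then 0 :: (pvBreaks t).map (· + 1) else (pvBreaks t).map (· + 1)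

lemma breaks_eq (xs : List Int) (s : Int) :
    (((PySem.List.enumerate xs s).filter (fun p => p.2 == 10)).map Prod.fst) =
      (pvBreaks xs).map (fun n : Nat => s + n) := by
  induction xs generalizing s with
  | nil => simp [PySem.List.enumerate_nil, pvBreaks]
  | cons x t ih =>
    by_cases hx : x = 10
    · simp only [PySem.List.enumerate_cons, pvBreaks, hx]
      simp [ih, List.map_map, Function.comp]
      intro n _; ring
    · simp only [PySem.List.enumerate_cons, pvBreaks, if_neg hx]
      have : ((s, x).2 == (10 : Int)) = false := by simpa using hx
      simp [this, ih, List.map_map, Function.comp]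
      intro n _; ring

/-- The rows B's slicing loop produces, as a recursion on the break table. -/
def pvBRows (data : List Int) : List Nat → Nat → List (List Int)
  | [], _ => []
  | i :: bs, p => (data.drop p).take (i - p) :: pvBRows data bs (i + 1)

lemma foldB_eq_bRows (data : List Int) (bs : List Nat) (g : List (List Int)) (p : Nat) :
    (((bs.map (fun n : Nat => (n : Int))).foldl (pvStepB data) (g, (p : Int))).1) =
      g ++ pvBRows data bs p := by
  induction bs generalizing g p with
  | nil => simp [pvBRows]
  | cons i t ih =>
    simp only [List.map_cons, List.foldl_cons, pvStepB, pvBRows]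
    rw [PySem.List.slice_natCast]
    have : ((i : Int) + 1) = (((i + 1 : Nat)) : Int) := by push_cast; ring
    rw [this, ih]
    simp

lemma bRows_shift (data : List Int) (x : Int) (bs : List Nat) (p : Nat) :
    pvBRows (x :: data) (bs.map (· + 1)) (p + 1) = pvBRows data bs p := by
  induction bs generalizing p with
  | nil => simp [pvBRows]
  | cons i t ih =>
    simp only [List.map_cons, pvBRows, List.drop_succ_cons]
    rw [show i + 1 - (p + 1) = i - p from by omega, ih]

/-- prepend `r` onto the first row, if any. -/
def pvConsFirst (r : List Int) : List (List Int) → List (List Int)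
  | [] => []
  | h :: t => (r ++ h) :: t

lemma rowsOf_eq_bRows (xs : List Int) (r : List Int) :
    pvRowsOf r xs = pvConsFirst r (pvBRows xs (pvBreaks xs) 0) := by
  induction xs generalizing r with
  | nil => simp [pvRowsOf, pvBreaks, pvBRows, pvConsFirst]
  | cons x t ih =>
    by_cases hx : x = 10
    · subst hx
      have hr : pvRowsOf r (10 :: t) = r :: pvRowsOf [] t := by simp [pvRowsOf]
      have hb : pvBreaks (10 :: t) = 0 :: (pvBreaks t).map (· + 1) := by simp [pvBreaks]
      rw [hr, hb]
      simp only [pvBRows]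
      rw [bRows_shift]
      simp only [Nat.sub_zero, List.take_zero, pvConsFirst, List.append_nil]
      rw [ih]
      cases h : pvBRows t (pvBreaks t) 0 <;> simp [pvConsFirst]
    · simp only [pvRowsOf, pvBreaks, if_neg hx]
      rw [ih]
      cases h : pvBreaks t with
      | nil =>
        have : pvBRows t ([] : List Nat) 0 = [] := rfl
        simp [h, pvBRows, pvConsFirst] at *
      | cons i bs =>
        simp only [List.map_cons, pvBRows, Nat.sub_zero, List.drop_zero]
        rw [show (i + 1 + 1 : Nat) = (i + 1) + 1 from rfl, bRows_shift]
        simp [pvConsFirst, List.take_succ_cons]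

lemma consFirst_nil (ls : List (List Int)) : pvConsFirst [] ls = ls := by
  cases ls <;> simp [pvConsFirst]

-- ===== VERDICT (by name: the statement is the Claim_ definition above) =====
theorem map_output_to_grid_spec : Claim_equal_map_output_to_grid := by
  intro output _
  unfold Spec_map_output_to_grid map_output_to_grid map_output_to_grid_alt
  dsimp only
  set data := PySem.List.slice output (some 0) (some (-1)) with hd
  rw [foldA_eq_rowsOf]
  rw [breaks_eq data 0]
  have h0 : (pvBreaks data).map (fun n : Nat => (0 : Int) + n) =
      (pvBreaks data).map (fun n : Nat => (n : Int)) := by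
    refine List.map_congr_left ?_; intro n _; ring
  rw [h0, show ((0 : Int)) = ((0 : Nat) : Int) from rfl, foldB_eq_bRows]
  rw [rowsOf_eq_bRows, consFirst_nil]
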